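-- pv_equiv track=rewrite | github.com/kindomLee/openclaw-workspace-template | scripts/memory-janitor.py | compress_p2_section
-- ===== SOURCE A (Python) =====
-- def compress_p2_section(section):
--     """Compress P2 section: keep only header + first 3 lines as conclusion."""
--     body = section["body"]
--     # Count non-blank content lines
--     content_lines = [l for l in body if l.strip() and not l.strip().startswith("<!--")]
--     if len(content_lines) <= 3:
--         return body, False  # Already compact
--
--     # Keep comment line + up to 3 content lines
--     new_body = []
--     content_count = 0
--     for line in body:
--         if line.strip().startswith("<!--"):
--             new_body.append(line)
--             continue
--         if not line.strip():
--             new_body.append(line)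
--             continue
--         content_count += 1
--         if content_count <= 3:
--             new_body.append(line)
--         elif content_count == 4:
--             new_body.append(f"- *(已壓縮 {len(content_lines) - 3} 行細節)*\n")
--             break
--
--     new_body.append("\n")
--     return new_body, True
-- ===== SOURCE B (Python) =====
-- def compress_p2_section(section):
--     """Compress P2 section: keep only header + first 3 lines as conclusion."""
--     body = section["body"]
--     positions = [i for i, l in enumerate(body)
--                  if l.strip() and not l.strip().startswith("<!--")]
--     if len(positions) <= 3:
--         return body, False  # Already compact
--     cutoff = positions[3]  # index of the 4th content line
--     return body[:cutoff] + [f"- *(已壓縮 {len(positions) - 3} 行細節)*\n", "\n"], True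
-- ===== Notes on version B (the rewrite author's own statement) =====
-- stated objective: simpler
-- what changed: Replaces the accumulate-and-break loop with counter state by computing the index of the 4th content line once and slicing body[:cutoff]; no per-line branching or mutable accumulator.
import Mathlib
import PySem

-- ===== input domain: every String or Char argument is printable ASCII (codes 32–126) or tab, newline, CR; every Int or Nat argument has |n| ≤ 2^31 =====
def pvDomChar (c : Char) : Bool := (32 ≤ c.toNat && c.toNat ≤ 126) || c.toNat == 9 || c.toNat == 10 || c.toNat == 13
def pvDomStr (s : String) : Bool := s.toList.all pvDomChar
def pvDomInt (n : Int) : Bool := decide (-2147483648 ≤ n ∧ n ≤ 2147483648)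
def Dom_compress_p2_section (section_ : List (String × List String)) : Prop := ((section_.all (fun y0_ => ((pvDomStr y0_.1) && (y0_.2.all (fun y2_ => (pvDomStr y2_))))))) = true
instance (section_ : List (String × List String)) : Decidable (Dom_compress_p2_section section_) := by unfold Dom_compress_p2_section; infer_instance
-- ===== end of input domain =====

-- B replaces A's accumulate-and-break loop by the index of the 4th content line and one slice (objective: simpler).

-- ===== PORT A =====
-- shared: the "content line" test `l.strip() and not l.strip().startswith("<!--")` (identical expression in both Pythons)
def pvContent (l : String) : Bool :=
  !(PySem.Str.strip l == "") && !(PySem.Str.startswith (PySem.Str.strip l) "<!--")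

-- the compressed-marker line f"- *(已壓縮 {k - 3} 行細節)*\n" (identical f-string in both Pythons)
def pvMsg (k : Nat) : String :=
  "- *(已壓縮 " ++ PySem.Int.toStr ((k : Int) - 3) ++ " 行細節)*\n"

-- A's `for line in body: …` with `content_count` and `break`
def pvA_loop (clen : Nat) : List String → Nat → List String → List String
  | [], _, acc => acc
  | line :: rest, cnt, acc =>
    if PySem.Str.startswith (PySem.Str.strip line) "<!--" then
      pvA_loop clen rest cnt (acc ++ [line])
    else if PySem.Str.strip line == "" then
      pvA_loop clen rest cnt (acc ++ [line])
    else if cnt + 1 ≤ 3 then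
      pvA_loop clen rest (cnt + 1) (acc ++ [line])
    else if cnt + 1 = 4 then
      acc ++ [pvMsg clen]          -- append marker, then break
    else
      pvA_loop clen rest (cnt + 1) acc

def compress_p2_section (section_ : List (String × List String)) : List String × Bool :=
  match section_.lookup "body" with
  | none => ([], false)            -- Python raises KeyError here; excluded by Pre_
  | some body =>
    let content_lines := body.filter pvContent
    if content_lines.length ≤ 3 then (body, false)
    else (pvA_loop content_lines.length body 0 [] ++ ["\n"], true)

-- ===== PORT B =====
def compress_p2_section_alt (section_ : List (String × List String)) : List String × Bool :=
  match section_.lookup "body" with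
  | none => ([], false)            -- Python raises KeyError here; excluded by Pre_
  | some body =>
    let positions := ((PySem.List.enumerate body 0).filter (fun p => pvContent p.2)).map (·.1)
    if positions.length ≤ 3 then (body, false)
    else
      match PySem.List.pyGet? positions 3 with
      | none => (body, false)      -- unreachable: positions has more than 3 elements
      | some cutoff =>
        (PySem.List.slice body none (some cutoff) ++ [pvMsg positions.length, "\n"], true)

-- ===== PRECONDITION & SPEC =====
-- Pre_ excludes only dicts without a "body" key, on which Python A raises KeyError.
def Pre_compress_p2_section (section_ : List (String × List String)) : Prop :=
  (section_.lookup "body").isSome = true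
instance (section_ : List (String × List String)) : Decidable (Pre_compress_p2_section section_) := by unfold Pre_compress_p2_section; infer_instance
def pvWitness_compress_p2_section : (List (String × List String)) := [("body", ["a\n", "b\n"])]

def Spec_compress_p2_section (section_ : List (String × List String)) (out : List String × Bool) : Prop := out = compress_p2_section_alt section_
instance (section_ : List (String × List String)) (out : List String × Bool) : Decidable (Spec_compress_p2_section section_ out) := by unfold Spec_compress_p2_section; infer_instance

-- ===== CLAIM (what is proved, stated in full; the proofs are below) =====
def Claim_equal_compress_p2_section : Prop := ∀ (section_ : List (String × List String)), Dom_compress_p2_section section_ → Pre_compress_p2_section section_ → Spec_compress_p2_section section_ (compress_p2_section section_)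

-- ===== LEMMAS AND PROOFS =====

-- proof-side: index (as a Nat) of the (r+1)-th content line of a list, if any
def pvIdx? : List String → Nat → Option Nat
  | [], _ => none
  | l :: rest, r =>
    if pvContent l then
      match r with
      | 0 => some 0
      | r + 1 => (pvIdx? rest r).map (· + 1)
    else (pvIdx? rest r).map (· + 1)

lemma pv_filter_len (body : List String) (s : Int) :
    (((PySem.List.enumerate body s).filter (fun p => pvContent p.2)).map (·.1)).length
      = (body.filter pvContent).length := by
  induction body generalizing s with
  | nil => simp [PySem.List.enumerate]
  | cons l rest ih =>
    rw [PySem.List.enumerate_cons]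
    by_cases h : pvContent l <;> simp [h, ih]

lemma pv_positions_get (body : List String) (s : Int) (r : Nat) :
    (((PySem.List.enumerate body s).filter (fun p => pvContent p.2)).map (·.1))[r]?
      = (pvIdx? body r).map (fun n => s + (n : Int)) := by
  induction body generalizing s r with
  | nil => simp [PySem.List.enumerate, pvIdx?]
  | cons l rest ih =>
    rw [PySem.List.enumerate_cons]
    by_cases h : pvContent l
    · cases r with
      | zero => simp [h, pvIdx?]
      | succ r =>
        simp only [List.filter_cons, h, if_pos, List.map_cons, List.getElem?_cons_succ, pvIdx?]
        rw [ih (s + 1) r]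
        cases pvIdx? rest r <;> simp <;> try ring
    · simp only [List.filter_cons, h, if_neg, Bool.false_eq_true, not_false_iff, pvIdx?]
      rw [ih (s + 1) r]
      cases pvIdx? rest r <;> simp <;> try ring

lemma pv_loop_eq (m : Nat) (body : List String) (cnt : Nat) (acc : List String)
    (hc : cnt ≤ 3) :
    pvA_loop m body cnt acc =
      match pvIdx? body (3 - cnt) with
      | some c => acc ++ body.take c ++ [pvMsg m]
      | none => acc ++ body := by
  induction body generalizing cnt acc with
  | nil => simp [pvA_loop, pvIdx?]
  | cons line rest ih =>
    by_cases h1 : PySem.Str.startswith (PySem.Str.strip line) "<!--"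
    · -- comment line: not content
      have hcontent : pvContent line = false := by unfold pvContent; rw [h1]; simp
      rw [pvA_loop, if_pos h1, ih _ _ hc]
      simp only [pvIdx?, hcontent, Bool.false_eq_true, if_neg, not_false_iff]
      cases pvIdx? rest (3 - cnt) <;> simp
    · by_cases h2 : PySem.Str.strip line == ""
      · -- blank line: not content
        have hcontent : pvContent line = false := by unfold pvContent; rw [h2]; simp
        rw [pvA_loop, if_neg h1, if_pos h2, ih _ _ hc]
        simp only [pvIdx?, hcontent, Bool.false_eq_true, if_neg, not_false_iff]
        cases pvIdx? rest (3 - cnt) <;> simp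
      · -- content line
        have hcontent : pvContent line = true := by
          unfold pvContent
          rw [Bool.eq_false_iff.mpr h1, Bool.eq_false_iff.mpr h2]
          rfl
        rw [pvA_loop, if_neg h1, if_neg h2]
        by_cases h3 : cnt + 1 ≤ 3
        · rw [if_pos h3, ih _ _ h3]
          have hr : 3 - cnt = (3 - (cnt + 1)) + 1 := by omega
          rw [hr]
          simp only [pvIdx?, hcontent, if_pos]
          cases pvIdx? rest (3 - (cnt + 1)) <;> simp
        · have hcnt : cnt = 3 := by omega
          rw [if_neg h3, if_pos (by omega : cnt + 1 = 4)]
          subst hcnt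
          simp [pvIdx?, hcontent]

lemma pv_slice_take (body : List String) (c : Nat) :
    PySem.List.slice body none (some (c : Int)) = body.take c := by
  simp [PySem.List.slice_to]

-- ===== VERDICT (by name: the statement is the Claim_ definition above) =====
theorem compress_p2_section_spec : Claim_equal_compress_p2_section := by
  intro section_ _ hpre
  unfold Spec_compress_p2_section compress_p2_section compress_p2_section_alt
  obtain ⟨body, hbody⟩ := Option.isSome_iff_exists.mp hpre
  rw [hbody]
  simp only
  have hlen := pv_filter_len body 0
  by_cases hle : (body.filter pvContent).length ≤ 3
  · rw [if_pos hle, if_pos (by omega : (((PySem.List.enumerate body 0).filter (fun p => pvContent p.2)).map (·.1)).length ≤ 3)]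
  · rw [if_neg hle, if_neg (by omega : ¬ (((PySem.List.enumerate body 0).filter (fun p => pvContent p.2)).map (·.1)).length ≤ 3)]
    -- the 4th position exists
    have hget := pv_positions_get body 0 3
    have hsome : (((PySem.List.enumerate body 0).filter (fun p => pvContent p.2)).map (·.1))[3]?.isSome = true := by
      rw [List.getElem?_eq_getElem (by omega)]; rfl
    rw [hget] at hsome
    obtain ⟨c, hc⟩ : ∃ c, pvIdx? body 3 = some c := by
      cases h : pvIdx? body 3 with
      | none => rw [h] at hsome; simp at hsome
      | some c => exact ⟨c, rfl⟩
    have hget3 : PySem.List.pyGet? (((PySem.List.enumerate body 0).filter (fun p => pvContent p.2)).map (·.1)) 3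
        = some ((c : Int)) := by
      rw [show (3 : Int) = ((3 : Nat) : Int) by norm_num, PySem.List.pyGet?_natCast, hget, hc]
      simp
    rw [hget3]
    simp only
    rw [pv_loop_eq (body.filter pvContent).length body 0 [] (by omega), hc]
    rw [pv_slice_take, hlen]
    simp
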